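-- pv_equiv track=rewrite | github.com/lrnselfreliance/wardreport | wardreport/common.py | priesthood_grouper
-- ===== SOURCE A (Python) =====
-- PRIESTHOODS = ('HIGH_PRIEST', 'ELDER', 'PRIEST', 'TEACHER', 'DEACON', 'UNORDAINED')
--
-- def priesthood_grouper(members):
--     """
--     Group members by their priesthood.
--     """
--     groups = {i: [] for i in PRIESTHOODS}
--     for member in members:
--         priesthood_office = member['priesthoodOffice']
--         if priesthood_office in groups:
--             groups[priesthood_office].append(member)
--         else:
--             groups['UNORDAINED'].append(member)
--
--     return groups
-- ===== SOURCE B (Python) =====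
-- PRIESTHOODS = ('HIGH_PRIEST', 'ELDER', 'PRIEST', 'TEACHER', 'DEACON', 'UNORDAINED')
--
-- def priesthood_grouper(members):
--     """
--     Group members by their priesthood.
--     """
--     members = list(members)
--     return {p: [m for m in members
--                 if (m['priesthoodOffice'] if m['priesthoodOffice'] in PRIESTHOODS else 'UNORDAINED') == p]
--             for p in PRIESTHOODS}
-- ===== Notes on version B (the rewrite author's own statement) =====
-- stated objective: idiomatic
-- what changed: Replaces the single-pass mutable-dict bucketing loop with a dict comprehension over PRIESTHOODS that filters the materialized member list once per office (k filtering passes instead of one bucketing pass).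
import Mathlib
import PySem

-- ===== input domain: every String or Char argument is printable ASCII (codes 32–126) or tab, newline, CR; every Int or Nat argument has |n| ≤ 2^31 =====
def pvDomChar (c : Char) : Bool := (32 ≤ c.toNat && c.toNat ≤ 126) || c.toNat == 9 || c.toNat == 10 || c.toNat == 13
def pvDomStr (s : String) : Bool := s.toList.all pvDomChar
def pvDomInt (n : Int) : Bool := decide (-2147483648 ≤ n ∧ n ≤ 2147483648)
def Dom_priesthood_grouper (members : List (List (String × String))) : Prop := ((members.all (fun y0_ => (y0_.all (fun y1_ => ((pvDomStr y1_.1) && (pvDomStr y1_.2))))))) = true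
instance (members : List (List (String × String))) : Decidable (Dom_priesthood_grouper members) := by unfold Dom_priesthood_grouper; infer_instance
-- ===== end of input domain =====

-- B replaces A's single-pass mutable-dict bucketing with a dict comprehension that filters the
-- member list once per priesthood office (idiomatic; same result, agreement proved below).

-- ===== PORT A =====
-- module constant PRIESTHOODS (shared by both Pythons)
def pvPRIESTHOODS : List String :=
  ["HIGH_PRIEST", "ELDER", "PRIEST", "TEACHER", "DEACON", "UNORDAINED"]

-- loop body of A's for-loop (getD "" is only reached outside Pre_, where Python raises KeyError)
def pgStepA (g : PySem.Dict String (List (List (String × String))))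
    (member : List (String × String)) : PySem.Dict String (List (List (String × String))) :=
  if g.contains ((PySem.Dict.mk member).getD "priesthoodOffice" "") then
    g.modify ((PySem.Dict.mk member).getD "priesthoodOffice" "") [] (· ++ [member])
  else
    g.modify "UNORDAINED" [] (· ++ [member])

-- groups = {i: [] for i in PRIESTHOODS}
def pgInit : PySem.Dict String (List (List (String × String))) :=
  pvPRIESTHOODS.foldl (fun d i => d.insert i []) PySem.Dict.empty

def priesthood_grouper (members : List (List (String × String))) :
    List (String × List (List (String × String))) :=
  (members.foldl pgStepA pgInit).items

-- ===== PORT B =====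
def priesthood_grouper_alt (members : List (List (String × String))) :
    List (String × List (List (String × String))) :=
  pvPRIESTHOODS.map (fun p =>
    (p, members.filter (fun m =>
      (if pvPRIESTHOODS.contains ((PySem.Dict.mk m).getD "priesthoodOffice" "")
       then (PySem.Dict.mk m).getD "priesthoodOffice" "" else "UNORDAINED") == p)))

-- ===== PRECONDITION & SPEC =====
-- Pre_ excludes members lacking the 'priesthoodOffice' key, on which both Pythons raise KeyError.
def Pre_priesthood_grouper (members : List (List (String × String))) : Prop :=
  (members.all (fun m => m.any (fun kv => kv.1 == "priesthoodOffice"))) = true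
instance (members : List (List (String × String))) : Decidable (Pre_priesthood_grouper members) := by
  unfold Pre_priesthood_grouper; infer_instance

def pvWitness_priesthood_grouper : (List (List (String × String))) :=
  [[("priesthoodOffice", "ELDER"), ("name", "A")], [("priesthoodOffice", "BISHOP")]]

def Spec_priesthood_grouper (members : List (List (String × String))) (out : List (String × List (List (String × String)))) : Prop := out = priesthood_grouper_alt members
instance (members : List (List (String × String))) (out : List (String × List (List (String × String)))) : Decidable (Spec_priesthood_grouper members out) := by unfold Spec_priesthood_grouper; infer_instance

-- ===== CLAIM (what is proved, stated in full; the proofs are below) =====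
def Claim_equal_priesthood_grouper : Prop := ∀ (members : List (List (String × String))), Dom_priesthood_grouper members → Pre_priesthood_grouper members → Spec_priesthood_grouper members (priesthood_grouper members)

-- ===== LEMMAS AND PROOFS =====

-- the effective bucket key of a member (B's inner conditional expression)
def pgKey (m : List (String × String)) : String :=
  if pvPRIESTHOODS.contains ((PySem.Dict.mk m).getD "priesthoodOffice" "")
  then (PySem.Dict.mk m).getD "priesthoodOffice" "" else "UNORDAINED"

theorem pgKey_mem (m : List (String × String)) : pgKey m ∈ pvPRIESTHOODS := by
  unfold pgKey
  split
  · next h => simpa using h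
  · decide

theorem pgStepA_eq (g : PySem.Dict String (List (List (String × String))))
    (hk : g.keys = pvPRIESTHOODS) (m : List (String × String)) :
    pgStepA g m = g.modify (pgKey m) [] (· ++ [m]) := by
  unfold pgStepA pgKey
  rw [PySem.Dict.contains_eq_decide_mem_keys, hk]
  by_cases h : (PySem.Dict.mk m).getD "priesthoodOffice" "" ∈ pvPRIESTHOODS <;>
    simp [h]

theorem pgStepA_keys (g : PySem.Dict String (List (List (String × String))))
    (hk : g.keys = pvPRIESTHOODS) (m : List (String × String)) :
    (pgStepA g m).keys = pvPRIESTHOODS := by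
  rw [pgStepA_eq g hk m, PySem.Dict.keys_modify,
      PySem.Dict.keys_insert_of_contains, hk]
  rw [PySem.Dict.contains_eq_decide_mem_keys, hk]
  simpa using pgKey_mem m

theorem pgLoop (ms : List (List (String × String)))
    (g : PySem.Dict String (List (List (String × String))))
    (hk : g.keys = pvPRIESTHOODS) :
    ms.foldl pgStepA g
      = (ms.map (fun m => (pgKey m, m))).foldl
          (fun d p => d.modify p.1 [] (· ++ [p.2])) g := by
  induction ms generalizing g with
  | nil => rfl
  | cons m ms ih =>
      simp only [List.foldl_cons, List.map_cons]
      rw [pgStepA_eq g hk m]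
      exact ih _ (by rw [← pgStepA_eq g hk m]; exact pgStepA_keys g hk m)

theorem pgLoop_keys (ms : List (List (String × String)))
    (g : PySem.Dict String (List (List (String × String))))
    (hk : g.keys = pvPRIESTHOODS) :
    (ms.foldl pgStepA g).keys = pvPRIESTHOODS := by
  induction ms generalizing g with
  | nil => exact hk
  | cons m ms ih => exact ih _ (pgStepA_keys g hk m)

theorem pgInit_keys : pgInit.keys = pvPRIESTHOODS := by decide

theorem pgInit_getD (k : String) : pgInit.getD k [] = [] := by
  show (PySem.Dict.mk [("HIGH_PRIEST", []), ("ELDER", []), ("PRIEST", []),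
        ("TEACHER", []), ("DEACON", []), ("UNORDAINED", [])]).getD k [] = []
  simp only [PySem.Dict.getD_eq_get?_getD, PySem.Dict.get?_mk_cons]
  split_ifs <;> simp [PySem.Dict.get?]

theorem pgFinal_getD (ms : List (List (String × String))) (k : String) :
    (ms.foldl pgStepA pgInit).getD k [] = ms.filter (fun m => pgKey m == k) := by
  rw [pgLoop ms pgInit pgInit_keys, PySem.Dict.getD_foldl_modify_append, pgInit_getD]
  simp [List.filter_map, Function.comp_def]

-- ===== VERDICT (by name: the statement is the Claim_ definition above) =====
theorem priesthood_grouper_spec : Claim_equal_priesthood_grouper := by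
  intro members _ _
  unfold Spec_priesthood_grouper priesthood_grouper priesthood_grouper_alt
  rw [PySem.Dict.items_eq_map_keys _ (by
        rw [pgLoop_keys members pgInit pgInit_keys]; decide) ([] : List (List (String × String)))]
  rw [pgLoop_keys members pgInit pgInit_keys]
  refine List.map_congr_left (fun p _ => ?_)
  rw [pgFinal_getD members p]
  rfl
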